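-- pv_equiv track=rewrite | github.com/Dzz1th/master_thesis | engine/engine/src/utils/utils.py | create_graph_from_pairs
-- ===== SOURCE A (Python) =====
-- from typing import List, Dict, Tuple, Set, Any, Optional
-- from collections import defaultdict, deque
--
-- def create_graph_from_pairs(pairs: List[Tuple[str, str]],
--                            ranks: List[int]) -> Tuple[Dict[int, List[Tuple[int, int]]], int, Dict[str, int]]:
--     """Create a directed graph from document pairs and rankings
--
--     Args:
--         pairs: List of document pairs
--         ranks: List of rankings (1 if first is better, -1 if second is better)
--
--     Returns:
--         Tuple containing the graph as adjacency list, number of documents,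
--         and mapping from document text to index
--     """
--     # Map unique documents to indices
--     text_to_index = {}
--     idx = 0
--     for pair in pairs:
--         for doc in pair:
--             if doc not in text_to_index:
--                 text_to_index[doc] = idx
--                 idx += 1
--
--     # Create graph
--     graph = defaultdict(list)
--     for (doc1, doc2), rank in zip(pairs, ranks):
--         idx1, idx2 = text_to_index[doc1], text_to_index[doc2]
--         ## Ranks are [1, -1, 0]. If rank is 0, we skip the edge because it doesn't
--         if rank == 1:
--             graph[idx1].append((idx2, 1))  # First doc is better
--             graph[idx2].append((idx1, -1))  # Second doc is worse
--         elif rank == -1: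
--             graph[idx2].append((idx1, 1))  # Second doc is better
--             graph[idx1].append((idx2, -1))  # First doc is worse
--
--     return graph, idx, text_to_index
-- ===== SOURCE B (Python) =====
-- def create_graph_from_pairs(pairs, ranks):
--     # Staged pipeline: (1) ordered dedup + enumerate gives the index map,
--     # (2) a flat directed-edge list is materialised, (3) the adjacency dict is
--     # built declaratively by grouping that edge list per source key.
--     order = list(dict.fromkeys(doc for pair in pairs for doc in pair))
--     text_to_index = {doc: i for i, doc in enumerate(order)}
--
--     def edges_for(pair_rank):
--         (d1, d2), rank = pair_rank
--         i1, i2 = text_to_index[d1], text_to_index[d2]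
--         if rank == 1:
--             return [(i1, (i2, 1)), (i2, (i1, -1))]
--         if rank == -1:
--             return [(i2, (i1, 1)), (i1, (i2, -1))]
--         return []
--
--     edges = [e for pr in zip(pairs, ranks) for e in edges_for(pr)]
--     graph_keys = list(dict.fromkeys(src for src, _ in edges))
--     graph = {s: [e for src, e in edges if src == s] for s in graph_keys}
--     return graph, len(order), text_to_index
-- ===== Notes on version B (the rewrite author's own statement) =====
-- stated objective: alternative
-- what changed: Replaced A's counter-driven indexing loop and interleaved per-pair dict mutation by a staged pipeline: dict.fromkeys dedup + enumerate builds the index map, a flat directed-edge list is materialised from zip(pairs, ranks), and the adjacency dict is built declaratively by a per-key group-by (filter comprehension) over that edge list in first-touch key order.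
import Mathlib
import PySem

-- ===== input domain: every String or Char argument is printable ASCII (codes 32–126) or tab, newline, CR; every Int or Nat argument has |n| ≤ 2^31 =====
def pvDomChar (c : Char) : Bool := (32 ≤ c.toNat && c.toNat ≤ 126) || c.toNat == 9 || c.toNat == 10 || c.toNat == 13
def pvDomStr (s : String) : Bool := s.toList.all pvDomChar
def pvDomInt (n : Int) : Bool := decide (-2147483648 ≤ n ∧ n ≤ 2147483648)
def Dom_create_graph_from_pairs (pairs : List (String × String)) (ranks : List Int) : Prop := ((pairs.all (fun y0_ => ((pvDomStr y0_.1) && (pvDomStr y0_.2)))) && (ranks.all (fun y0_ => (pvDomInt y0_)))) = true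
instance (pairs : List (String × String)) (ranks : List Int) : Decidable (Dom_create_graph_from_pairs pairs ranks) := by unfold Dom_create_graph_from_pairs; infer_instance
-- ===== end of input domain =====

-- B replaces A's counter-driven indexing loop and interleaved graph mutation by a
-- staged pipeline: ordered dedup + enumerate for the index map, a flat edge list,
-- then a per-key group-by (objective: alternative decomposition).

-- ===== PORT A =====
-- inner 'for doc in pair: if doc not in text_to_index: …'
def cgfpAdd (st : PySem.Dict String Int × Int) (doc : String) : PySem.Dict String Int × Int :=
  if st.1.contains doc then st else (st.1.insert doc st.2, st.2 + 1)

-- A's first loop: 'for pair in pairs: for doc in pair: …'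
def cgfpIndexLoop (pairs : List (String × String)) (st : PySem.Dict String Int × Int) :
    PySem.Dict String Int × Int :=
  pairs.foldl (fun st pair => [pair.1, pair.2].foldl cgfpAdd st) st

-- one iteration of A's second loop; text_to_index[doc] always finds its key
-- (every doc of pairs was indexed by the first loop), so getD _ 0 is exact
def cgfpEdge (t2i : PySem.Dict String Int) (g : PySem.Dict Int (List (Int × Int)))
    (pr : (String × String) × Int) : PySem.Dict Int (List (Int × Int)) :=
  let idx1 := t2i.getD pr.1.1 0
  let idx2 := t2i.getD pr.1.2 0
  if pr.2 = 1 then (g.modify idx1 [] (· ++ [(idx2, 1)])).modify idx2 [] (· ++ [(idx1, -1)])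
  else if pr.2 = -1 then (g.modify idx2 [] (· ++ [(idx1, 1)])).modify idx1 [] (· ++ [(idx2, -1)])
  else g

def create_graph_from_pairs (pairs : List (String × String)) (ranks : List Int) :
    (List (Int × List (Int × Int))) × Int × (List (String × Int)) :=
  let st := cgfpIndexLoop pairs (PySem.Dict.empty, 0)
  let g := (pairs.zip ranks).foldl (cgfpEdge st.1) PySem.Dict.empty
  (g.items, st.2, st.1.items)

-- ===== PORT B =====
-- Source B's edges_for helper; text_to_index[d] always finds its key (every doc of
-- pairs is in order), so getD _ 0 is exact
def cgfpEdgeFor (t2i : PySem.Dict String Int) (pr : (String × String) × Int) :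
    List (Int × (Int × Int)) :=
  let i1 := t2i.getD pr.1.1 0
  let i2 := t2i.getD pr.1.2 0
  if pr.2 = 1 then [(i1, (i2, 1)), (i2, (i1, -1))]
  else if pr.2 = -1 then [(i2, (i1, 1)), (i1, (i2, -1))]
  else []

def create_graph_from_pairs_alt (pairs : List (String × String)) (ranks : List Int) :
    (List (Int × List (Int × Int))) × Int × (List (String × Int)) :=
  -- order = list(dict.fromkeys(doc for pair in pairs for doc in pair))
  let order := PySem.List.dedup (pairs.flatMap (fun p => [p.1, p.2]))
  -- text_to_index = {doc: i for i, doc in enumerate(order)}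
  let t2i := (PySem.List.enumerate order).foldl (fun d p => d.insert p.2 p.1) PySem.Dict.empty
  -- edges = [e for pr in zip(pairs, ranks) for e in edges_for(pr)]
  let edges := (pairs.zip ranks).flatMap (cgfpEdgeFor t2i)
  -- graph_keys = list(dict.fromkeys(src for src, _ in edges))
  let gkeys := PySem.List.dedup (edges.map (·.1))
  -- graph = {s: [e for src, e in edges if src == s] for s in graph_keys}
  let graph := gkeys.foldl
    (fun g s => g.insert s ((edges.filter (fun e => e.1 == s)).map (·.2))) PySem.Dict.empty
  (graph.items, (order.length : Int), t2i.items)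

-- ===== PRECONDITION & SPEC =====
def Spec_create_graph_from_pairs (pairs : List (String × String)) (ranks : List Int) (out : (List (Int × List (Int × Int))) × Int × (List (String × Int))) : Prop := out = create_graph_from_pairs_alt pairs ranks
instance (pairs : List (String × String)) (ranks : List Int) (out : (List (Int × List (Int × Int))) × Int × (List (String × Int))) : Decidable (Spec_create_graph_from_pairs pairs ranks out) := by unfold Spec_create_graph_from_pairs; infer_instance

-- ===== CLAIM (what is proved, stated in full; the proofs are below) =====
def Claim_equal_create_graph_from_pairs : Prop := ∀ (pairs : List (String × String)) (ranks : List Int), Dom_create_graph_from_pairs pairs ranks → Spec_create_graph_from_pairs pairs ranks (create_graph_from_pairs pairs ranks)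

-- ===== LEMMAS AND PROOFS =====

-- the index dict whose items enumerate acc: {acc[i] ↦ i}
def cgfpIdxDict (acc : List String) : PySem.Dict String Int :=
  PySem.Dict.mk ((PySem.List.enumerate acc).map (fun p => (p.2, p.1)))

theorem cgfpEnum_append (xs : List String) (x : String) (s : Int) :
    PySem.List.enumerate (xs ++ [x]) s = PySem.List.enumerate xs s ++ [(s + xs.length, x)] := by
  induction xs generalizing s with
  | nil => simp [PySem.List.enumerate_cons]
  | cons y ys ih =>
    simp [PySem.List.enumerate_cons, ih]
    ring_nf

theorem cgfpIdxDict_keys (acc : List String) : (cgfpIdxDict acc).keys = acc := by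
  show (PySem.Dict.mk _).keys = acc
  rw [PySem.Dict.keys_mk, List.map_map]
  exact PySem.List.map_snd_enumerate acc 0

theorem cgfpAdd_idx (acc : List String) (d : String) :
    cgfpAdd (cgfpIdxDict acc, (acc.length : Int)) d =
      (cgfpIdxDict (PySem.Set.add acc d), ((PySem.Set.add acc d).length : Int)) := by
  unfold cgfpAdd PySem.Set.add
  have hc : (cgfpIdxDict acc).contains d = acc.contains d := by
    rw [PySem.Dict.contains_eq_decide_mem_keys, cgfpIdxDict_keys]
    simp
  by_cases h : d ∈ acc
  · simp [hc, h]
  · have hcon : acc.contains d = false := by simpa using h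
    have hsc : PySem.Set.contains acc d = false := hcon
    simp only [hc, hcon, hsc, Bool.false_eq_true, if_false, Prod.mk.injEq]
    constructor
    · apply PySem.Dict.ext
      rw [PySem.Dict.items_insert_of_not_contains _ _ (by rw [hc, hcon])]
      simp [cgfpIdxDict, cgfpEnum_append]
    · simp

theorem cgfpAdd_foldl (docs acc : List String) :
    docs.foldl cgfpAdd (cgfpIdxDict acc, (acc.length : Int)) =
      (cgfpIdxDict (PySem.Set.update acc docs), ((PySem.Set.update acc docs).length : Int)) := by
  induction docs generalizing acc with
  | nil => simp [PySem.Set.update_nil]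
  | cons d ds ih =>
    rw [List.foldl_cons, cgfpAdd_idx, ih, PySem.Set.update_cons]

theorem cgfpIndexLoop_eq (pairs : List (String × String)) :
    cgfpIndexLoop pairs (PySem.Dict.empty, 0) =
      (cgfpIdxDict (PySem.List.dedup (pairs.flatMap (fun p => [p.1, p.2]))),
       ((PySem.List.dedup (pairs.flatMap (fun p => [p.1, p.2]))).length : Int)) := by
  have h0 : (PySem.Dict.empty, (0 : Int)) = (cgfpIdxDict [], (([] : List String).length : Int)) := by
    simp [cgfpIdxDict]; rfl
  unfold cgfpIndexLoop
  rw [← List.foldl_flatMap, h0, cgfpAdd_foldl, PySem.Set.update_nil_left,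
    PySem.List.dedup_eq_ofList]

-- B's dict comprehension over enumerate(order) builds exactly cgfpIdxDict order
theorem cgfpAlt_t2i (order : List String) (h : order.Nodup) :
    (PySem.List.enumerate order).foldl (fun d p => d.insert p.2 p.1) PySem.Dict.empty =
      cgfpIdxDict order := by
  apply PySem.Dict.ext
  rw [PySem.Dict.items_foldl_insert_fresh (PySem.List.enumerate order) (fun p => p.2)
    (fun p => p.1) PySem.Dict.empty (by intro a _; simp [PySem.Dict.contains_empty])
    (by rw [PySem.List.map_snd_enumerate]; exact h)]
  simp [cgfpIdxDict, PySem.Dict.empty]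

-- each iteration of A's edge loop is a fold over that pair's flat edge list
theorem cgfpEdge_fun_eq (t : PySem.Dict String Int) :
    cgfpEdge t = fun g pr => (cgfpEdgeFor t pr).foldl
      (fun g e => g.modify e.1 [] (· ++ [e.2])) g := by
  funext g pr
  unfold cgfpEdge cgfpEdgeFor
  split_ifs <;> rfl

-- items of the grouped-by-modify fold = per-key filtered lists in first-touch key order
theorem cgfpGroup_items (E : List (Int × (Int × Int))) :
    ((E.foldl (fun g e => g.modify e.1 [] (· ++ [e.2])) PySem.Dict.empty).items) =
      (PySem.List.dedup (E.map (·.1))).map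
        (fun s => (s, (E.filter (fun e => e.1 == s)).map (·.2))) := by
  have hkeys : (E.foldl (fun g e => g.modify e.1 [] (· ++ [e.2])) PySem.Dict.empty).keys =
      PySem.List.dedup (E.map (·.1)) := by
    rw [PySem.Dict.keys_foldl_modify_key E (fun e => e.1) [] (fun _ e => (· ++ [e.2]))
      PySem.Dict.empty, PySem.List.dedup_eq_ofList]
    simp [PySem.Dict.keys_empty, PySem.Set.update_nil_left]
  have hnd : (E.foldl (fun g e => g.modify e.1 [] (· ++ [e.2])) PySem.Dict.empty).keys.Nodup :=
    PySem.Dict.nodup_keys_foldl_modify_key E (fun e => e.1) [] (fun _ e => (· ++ [e.2]))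
      PySem.Dict.empty PySem.Dict.nodup_keys_empty
  rw [PySem.Dict.items_eq_map_keys _ hnd [], hkeys]
  apply List.map_congr_left
  intro s _
  rw [PySem.Dict.getD_foldl_modify_append E PySem.Dict.empty s]
  simp [PySem.Dict.getD_empty]

-- B's dict comprehension over graph_keys has exactly those items
theorem cgfpAlt_graph_items (E : List (Int × (Int × Int))) :
    ((PySem.List.dedup (E.map (·.1))).foldl
      (fun g s => g.insert s ((E.filter (fun e => e.1 == s)).map (·.2)))
      PySem.Dict.empty).items =
      (PySem.List.dedup (E.map (·.1))).map
        (fun s => (s, (E.filter (fun e => e.1 == s)).map (·.2))) := by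
  rw [PySem.Dict.items_foldl_insert_fresh (PySem.List.dedup (E.map (·.1))) (fun s => s)
    (fun s => (E.filter (fun e => e.1 == s)).map (·.2)) PySem.Dict.empty
    (by intro a _; simp [PySem.Dict.contains_empty])
    (by simp only [List.map_id_fun']; exact PySem.List.nodup_dedup (E.map (·.1)))]
  simp [PySem.Dict.empty]

-- ===== VERDICT (by name: the statement is the Claim_ definition above) =====
theorem create_graph_from_pairs_spec : Claim_equal_create_graph_from_pairs := by
  intro pairs ranks _
  unfold Spec_create_graph_from_pairs
  simp only [create_graph_from_pairs, create_graph_from_pairs_alt]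
  rw [cgfpIndexLoop_eq, cgfpAlt_t2i _ (PySem.List.nodup_dedup _)]
  rw [cgfpEdge_fun_eq, ← List.foldl_flatMap, cgfpGroup_items, cgfpAlt_graph_items]
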